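-- pv_equiv track=rewrite | github.com/viktor-ktorvi/optimizacioni-algoritmi-u-inzenjerstvu | vezbe_6/main.py | change_x
-- ===== SOURCE A (Python) =====
-- def change_x(x, x_round, delta_x, variation):
--     j = 0
--     for i in range(len(x)):
--         if x_round[i] == 0:
--             x[i] = 0
--         else:
--             x[i] = x_round[i] + delta_x[variation[j]]
--             j += 1
--             if x[i] < 0:
--                 x[i] = 0
--     return x
-- ===== SOURCE B (Python) =====
-- def change_x(x, x_round, delta_x, variation):
--     nonzero = [i for i in range(len(x)) if x_round[i] != 0]
--     for j, i in enumerate(nonzero):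
--         v = x_round[i] + delta_x[variation[j]]
--         x[i] = v if v >= 0 else 0
--     for i in range(len(x)):
--         if x_round[i] == 0:
--             x[i] = 0
--     return x
-- ===== Notes on version B (the rewrite author's own statement) =====
-- stated objective: alternative
-- what changed: Replaces A's single index loop with a stateful counter j by precomputing the list of nonzero positions and applying the deltas with enumerate over that list, then zeroing the remaining positions in a separate pass.
import Mathlib
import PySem

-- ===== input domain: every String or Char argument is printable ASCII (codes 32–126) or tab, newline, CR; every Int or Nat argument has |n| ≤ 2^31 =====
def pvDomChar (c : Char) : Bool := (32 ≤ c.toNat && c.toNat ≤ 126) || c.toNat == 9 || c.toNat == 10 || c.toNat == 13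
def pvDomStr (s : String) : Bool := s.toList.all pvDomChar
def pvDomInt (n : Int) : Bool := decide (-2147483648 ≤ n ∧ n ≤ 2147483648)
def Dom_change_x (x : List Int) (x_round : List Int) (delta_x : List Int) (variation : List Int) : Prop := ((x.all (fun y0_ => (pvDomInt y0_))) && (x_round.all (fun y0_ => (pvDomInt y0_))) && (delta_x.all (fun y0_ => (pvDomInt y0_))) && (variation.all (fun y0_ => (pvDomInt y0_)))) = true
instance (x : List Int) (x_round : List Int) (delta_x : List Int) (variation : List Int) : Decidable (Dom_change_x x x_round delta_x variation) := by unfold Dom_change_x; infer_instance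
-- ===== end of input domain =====

-- B applies the deltas over the precomputed list of nonzero positions (enumerate supplies j),
-- then zeroes the remaining positions in a second pass, instead of A's single loop with a
-- stateful counter.  Both Pythons mutate x in place; the equivalence proved is about the
-- return value (identical here on all admitted inputs).

-- ===== PORT A =====
-- loop of A: recursion over the index list of range(len(x)); indices from range are
-- nonnegative, so Nat indices and getD are exact under Pre_ (which puts every access in range);
-- delta_x[variation[j]] allows a negative index, ported with PySem.List.pyGetD.
def change_x_go (x_round : List Int) (delta_x : List Int) (variation : List Int)
    (xs : List Int) (j : Int) : List Nat → List Int
  | [] => xs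
  | i :: rest =>
    if x_round.getD i 0 = 0 then
      change_x_go x_round delta_x variation (xs.set i 0) j rest
    else
      let v := x_round.getD i 0 + PySem.List.pyGetD delta_x (variation.getD j.toNat 0) 0
      change_x_go x_round delta_x variation (xs.set i (if v < 0 then 0 else v)) (j + 1) rest

def change_x (x : List Int) (x_round : List Int) (delta_x : List Int) (variation : List Int) : List Int :=
  change_x_go x_round delta_x variation x 0 (List.range x.length)

-- ===== PORT B =====
def change_x_alt (x : List Int) (x_round : List Int) (delta_x : List Int) (variation : List Int) : List Int :=
  let nonzero : List Nat := (List.range x.length).filter (fun i => x_round.getD i 0 ≠ 0)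
  let x1 := (PySem.List.enumerate nonzero 0).foldl (fun xs ji =>
      let v := x_round.getD ji.2 0 + PySem.List.pyGetD delta_x (variation.getD ji.1.toNat 0) 0
      xs.set ji.2 (if 0 ≤ v then v else 0)) x
  (List.range x.length).foldl (fun xs i => if x_round.getD i 0 = 0 then xs.set i 0 else xs) x1

-- ===== PRECONDITION & SPEC =====
-- Pre_ excludes exactly the inputs on which the Python A raises IndexError: x_round shorter
-- than x, fewer entries in variation than nonzero rounded values, or a variation entry out of
-- range as an index into delta_x.
def Pre_change_x (x : List Int) (x_round : List Int) (delta_x : List Int) (variation : List Int) : Prop :=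
  x.length ≤ x_round.length ∧
  ((List.range x.length).filter (fun i => x_round.getD i 0 ≠ 0)).length ≤ variation.length ∧
  ∀ j ∈ List.range ((List.range x.length).filter (fun i => x_round.getD i 0 ≠ 0)).length,
    PySem.Raise.InRange delta_x.length (variation.getD j 0)

instance (x : List Int) (x_round : List Int) (delta_x : List Int) (variation : List Int) : Decidable (Pre_change_x x x_round delta_x variation) := by unfold Pre_change_x; infer_instance

def pvWitness_change_x : List Int × List Int × List Int × List Int := ([9, 9, 9], [2, 0, -4], [5, -1], [1, -2])

def Spec_change_x (x : List Int) (x_round : List Int) (delta_x : List Int) (variation : List Int) (out : List Int) : Prop := out = change_x_alt x x_round delta_x variation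
instance (x : List Int) (x_round : List Int) (delta_x : List Int) (variation : List Int) (out : List Int) : Decidable (Spec_change_x x x_round delta_x variation out) := by unfold Spec_change_x; infer_instance

-- ===== CLAIM (what is proved, stated in full; the proofs are below) =====
def Claim_equal_change_x : Prop := ∀ (x : List Int) (x_round : List Int) (delta_x : List Int) (variation : List Int), Dom_change_x x x_round delta_x variation → Pre_change_x x x_round delta_x variation → Spec_change_x x x_round delta_x variation (change_x x x_round delta_x variation)

-- ===== LEMMAS AND PROOFS =====

-- setting an index that none of the enumerated pairs touch commutes with B's first pass
theorem nzfold_set (x_round delta_x variation : List Int)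
    (pairs : List (Int × Nat)) (ys : List Int) (i : Nat) (a : Int)
    (h : ∀ p ∈ pairs, p.2 ≠ i) :
    pairs.foldl (fun xs ji =>
      let v := x_round.getD ji.2 0 + PySem.List.pyGetD delta_x (variation.getD ji.1.toNat 0) 0
      xs.set ji.2 (if 0 ≤ v then v else 0)) (ys.set i a)
    = (pairs.foldl (fun xs ji =>
      let v := x_round.getD ji.2 0 + PySem.List.pyGetD delta_x (variation.getD ji.1.toNat 0) 0
      xs.set ji.2 (if 0 ≤ v then v else 0)) ys).set i a := by
  induction pairs generalizing ys with
  | nil => rfl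
  | cons p rest ih =>
    simp only [List.foldl_cons]
    rw [List.set_comm _ _ (Ne.symm (h p List.mem_cons_self))]
    exact ih _ (fun q hq => h q (List.mem_cons_of_mem _ hq))

-- main invariant: A's interleaved loop equals B's two passes, over any index list l
theorem go_eq (x_round delta_x variation : List Int) :
    ∀ (l : List Nat) (xs : List Int) (j : Int),
    change_x_go x_round delta_x variation xs j l
    = (l.filter (fun i => x_round.getD i 0 = 0)).foldl (fun xs i => xs.set i 0)
        ((PySem.List.enumerate (l.filter (fun i => x_round.getD i 0 ≠ 0)) j).foldl
          (fun xs ji =>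
            let v := x_round.getD ji.2 0 + PySem.List.pyGetD delta_x (variation.getD ji.1.toNat 0) 0
            xs.set ji.2 (if 0 ≤ v then v else 0)) xs) := by
  intro l
  induction l with
  | nil => intro xs j; rfl
  | cons i rest ih =>
    intro xs j
    by_cases hz : x_round.getD i 0 = 0
    · have hz' : x_round[i]?.getD 0 = 0 := by rw [← List.getD_eq_getElem?_getD]; exact hz
      rw [change_x_go, if_pos hz]
      rw [ih]
      have hf1 : (i :: rest).filter (fun i => x_round.getD i 0 = 0)
          = i :: rest.filter (fun i => x_round.getD i 0 = 0) := by
        simp [hz']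
      have hf2 : (i :: rest).filter (fun i => x_round.getD i 0 ≠ 0)
          = rest.filter (fun i => x_round.getD i 0 ≠ 0) := by
        simp [hz']
      rw [hf1, hf2, List.foldl_cons]
      rw [nzfold_set]
      intro p hp hpi
      have : p.2 ∈ rest.filter (fun i => x_round.getD i 0 ≠ 0) := by
        have := PySem.List.map_snd_enumerate (rest.filter (fun i => x_round.getD i 0 ≠ 0)) j
        rw [← this]
        exact List.mem_map_of_mem hp
      rw [hpi] at this
      have := List.of_mem_filter this
      simp at this
      exact this hz
    · have hz' : ¬ x_round[i]?.getD 0 = 0 := by rw [← List.getD_eq_getElem?_getD]; exact hz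
      rw [change_x_go, if_neg hz]
      rw [ih]
      have hf1 : (i :: rest).filter (fun i => x_round.getD i 0 = 0)
          = rest.filter (fun i => x_round.getD i 0 = 0) := by
        simp [hz']
      have hf2 : (i :: rest).filter (fun i => x_round.getD i 0 ≠ 0)
          = i :: rest.filter (fun i => x_round.getD i 0 ≠ 0) := by
        simp [hz']
      rw [hf1, hf2, PySem.List.enumerate_cons, List.foldl_cons]
      have hval : (if x_round.getD i 0 + PySem.List.pyGetD delta_x (variation.getD j.toNat 0) 0 < 0 then 0
            else x_round.getD i 0 + PySem.List.pyGetD delta_x (variation.getD j.toNat 0) 0)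
          = (if 0 ≤ x_round.getD i 0 + PySem.List.pyGetD delta_x (variation.getD j.toNat 0) 0 then
              x_round.getD i 0 + PySem.List.pyGetD delta_x (variation.getD j.toNat 0) 0 else 0) := by
        split_ifs <;> omega
      simp only [hval]

-- ===== VERDICT (by name: the statement is the Claim_ definition above) =====
theorem change_x_spec : Claim_equal_change_x := by
  intro x x_round delta_x variation _ _
  unfold Spec_change_x change_x change_x_alt
  rw [go_eq]
  rw [PySem.List.foldl_ite_eq_foldl_filter]
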